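-- pv_equiv track=rewrite | github.com/giyeong-lee/GM4HDDA_Term_Project | src/utils_preprocess.py | is_holiday
-- ===== SOURCE A (Python) =====
-- def gFri2eMon(g_fri):
--     yyyy, mm, dd = g_fri.split('-')
--     dd = int(dd) + 3
--
--     if (mm == '03' and dd > 31):
--         mm = '04'
--         dd = '0' + str(dd-31)
--     elif (mm == '04' and dd > 30):
--         mm = '05'
--         dd = '0' + str(dd-30)
--     else:
--         dd = '0'*int(dd < 10) + str(dd)
--
--     return '-'.join([yyyy, mm, dd])
--
-- def is_holiday(date):
--     holidays = ['01-01',  # newyear's day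
--                 '05-01',  # worker's day
--                 '12-25',  # X-mas
--                 '12-26'   # boxing day
--                ]
--
--     good_fridays = ['2000-04-21', '2001-04-13', '2002-03-29', '2003-04-18', '2004-04-09',
--                     '2005-03-25', '2006-04-14', '2007-04-06', '2008-03-21', '2009-04-10',
--                     '2010-04-02', '2011-04-22', '2012-04-06', '2013-03-29', '2014-04-18',
--                     '2015-04-03', '2016-03-25', '2017-04-14', '2018-03-30', '2019-04-19',
--                     '2020-04-10', '2021-04-02', '2022-04-15'
--                    ]
--
--     easter_mondays = [gFri2eMon(g_fri) for g_fri in good_fridays]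
--
--     return (date[-5:] in holidays) or (date in good_fridays + easter_mondays)
-- ===== SOURCE B (Python) =====
-- def _to_ord(y, m, d):
--     # days since 0000-03-01 era scheme (Howard Hinnant's civil-from-days, inverse)
--     y -= m <= 2
--     era = y // 400
--     yoe = y - era * 400
--     doy = (153 * (m + (-3 if m > 2 else 9)) + 2) // 5 + d - 1
--     doe = yoe * 365 + yoe // 4 - yoe // 100 + doy
--     return era * 146097 + doe
--
-- def _from_ord(z):
--     era = z // 146097
--     doe = z - era * 146097
--     yoe = (doe - doe // 1460 + doe // 36524 - doe // 146096) // 365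
--     y = yoe + era * 400
--     doy = doe - (365 * yoe + yoe // 4 - yoe // 100)
--     mp = (5 * doy + 2) // 153
--     d = doy - (153 * mp + 2) // 5 + 1
--     m = mp + (3 if mp < 10 else -9)
--     return y + (m <= 2), m, d
--
-- def is_holiday(date):
--     holidays = ['01-01', '05-01', '12-25', '12-26']
--
--     good_fridays = ['2000-04-21', '2001-04-13', '2002-03-29', '2003-04-18', '2004-04-09',
--                     '2005-03-25', '2006-04-14', '2007-04-06', '2008-03-21', '2009-04-10',
--                     '2010-04-02', '2011-04-22', '2012-04-06', '2013-03-29', '2014-04-18',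
--                     '2015-04-03', '2016-03-25', '2017-04-14', '2018-03-30', '2019-04-19',
--                     '2020-04-10', '2021-04-02', '2022-04-15']
--
--     easter_mondays = []
--     for g in good_fridays:
--         y, m, d = (int(x) for x in g.split('-'))
--         y2, m2, d2 = _from_ord(_to_ord(y, m, d) + 3)
--         easter_mondays.append(str(y2).zfill(4) + '-' + str(m2).zfill(2) + '-' + str(d2).zfill(2))
--
--     return (date[-5:] in holidays) or (date in good_fridays + easter_mondays)
-- ===== Notes on version B (the rewrite author's own statement) =====
-- stated objective: alternative
-- what changed: Easter Mondays are computed by converting each Good Friday to an absolute day ordinal (days-from-civil), adding 3 days and converting back with zero-padded formatting, instead of A's hand-rolled month-rollover string/carry branching.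
import Mathlib
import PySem

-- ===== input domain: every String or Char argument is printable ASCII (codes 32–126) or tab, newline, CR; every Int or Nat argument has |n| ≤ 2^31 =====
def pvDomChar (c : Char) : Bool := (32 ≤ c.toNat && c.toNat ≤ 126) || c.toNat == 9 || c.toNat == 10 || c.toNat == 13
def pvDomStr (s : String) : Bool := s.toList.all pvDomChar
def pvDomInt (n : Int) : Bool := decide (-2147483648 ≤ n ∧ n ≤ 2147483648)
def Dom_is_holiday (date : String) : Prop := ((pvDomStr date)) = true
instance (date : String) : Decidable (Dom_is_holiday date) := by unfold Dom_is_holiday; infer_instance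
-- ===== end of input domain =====

-- B replaces A's hand-rolled month-rollover string branching by a round trip through an
-- absolute day ordinal (days-from-civil / civil-from-days) to add 3 days; objective: alternative.

-- ===== PORT A =====
-- helper gFri2eMon: split('-') is Str.split? (some-valued since sep ≠ ''); int(dd) via PySem.Int.ofStr?
-- (the '| _' / '.getD 0' defaults are unreachable for the well-formed constants A applies it to,
-- matching Python which would raise there).
def gFri2eMon (g_fri : String) : String :=
  match (PySem.Str.split? g_fri "-").getD [] with
  | [yyyy, mm, d] =>
    let dd : Int := (PySem.Int.ofStr? d).getD 0 + 3
    if mm == "03" && dd > 31 then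
      PySem.Str.join "-" [yyyy, "04", "0" ++ PySem.Int.toStr (dd - 31)]
    else if mm == "04" && dd > 30 then
      PySem.Str.join "-" [yyyy, "05", "0" ++ PySem.Int.toStr (dd - 30)]
    else
      PySem.Str.join "-" [yyyy, mm, (if dd < 10 then "0" else "") ++ PySem.Int.toStr dd]
  | _ => ""

def pvHolidays : List String := ["01-01", "05-01", "12-25", "12-26"]

def pvGoodFridays : List String :=
  ["2000-04-21", "2001-04-13", "2002-03-29", "2003-04-18", "2004-04-09",
   "2005-03-25", "2006-04-14", "2007-04-06", "2008-03-21", "2009-04-10",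
   "2010-04-02", "2011-04-22", "2012-04-06", "2013-03-29", "2014-04-18",
   "2015-04-03", "2016-03-25", "2017-04-14", "2018-03-30", "2019-04-19",
   "2020-04-10", "2021-04-02", "2022-04-15"]

def is_holiday (date : String) : Bool :=
  let easter_mondays := pvGoodFridays.map gFri2eMon
  (pvHolidays.contains (PySem.Str.slice date (some (-5)) none)) ||
    ((pvGoodFridays ++ easter_mondays).contains date)

-- ===== PORT B =====
-- '//' is Python floor division = PySem.Int.floordiv
def pvToOrd (y m d : Int) : Int :=
  let y := y - (if m ≤ 2 then 1 else 0)
  let era := PySem.Int.floordiv y 400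
  let yoe := y - era * 400
  let doy := PySem.Int.floordiv (153 * (m + (if m > 2 then -3 else 9)) + 2) 5 + d - 1
  let doe := yoe * 365 + PySem.Int.floordiv yoe 4 - PySem.Int.floordiv yoe 100 + doy
  era * 146097 + doe

def pvFromOrd (z : Int) : Int × Int × Int :=
  let era := PySem.Int.floordiv z 146097
  let doe := z - era * 146097
  let yoe := PySem.Int.floordiv
    (doe - PySem.Int.floordiv doe 1460 + PySem.Int.floordiv doe 36524 - PySem.Int.floordiv doe 146096) 365
  let y := yoe + era * 400
  let doy := doe - (365 * yoe + PySem.Int.floordiv yoe 4 - PySem.Int.floordiv yoe 100)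
  let mp := PySem.Int.floordiv (5 * doy + 2) 153
  let d := doy - PySem.Int.floordiv (153 * mp + 2) 5 + 1
  let m := mp + (if mp < 10 then 3 else -9)
  (y + (if m ≤ 2 then 1 else 0), m, d)

-- one Good-Friday string → the easter-monday string, via the ordinal round trip;
-- str(n).zfill(k) is PySem.Str.zfill (PySem.Int.toStr n) k (exact)
def pvEMon (g : String) : String :=
  match ((PySem.Str.split? g "-").getD []).map (fun x => (PySem.Int.ofStr? x).getD 0) with
  | [y, m, d] =>
    let r := pvFromOrd (pvToOrd y m d + 3)
    PySem.Str.zfill (PySem.Int.toStr r.1) 4 ++ "-" ++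
      PySem.Str.zfill (PySem.Int.toStr r.2.1) 2 ++ "-" ++
      PySem.Str.zfill (PySem.Int.toStr r.2.2) 2
  | _ => ""

def is_holiday_alt (date : String) : Bool :=
  let easter_mondays := pvGoodFridays.map pvEMon
  (pvHolidays.contains (PySem.Str.slice date (some (-5)) none)) ||
    ((pvGoodFridays ++ easter_mondays).contains date)

-- ===== PRECONDITION & SPEC =====
def Spec_is_holiday (date : String) (out : Bool) : Prop := out = is_holiday_alt date
instance (date : String) (out : Bool) : Decidable (Spec_is_holiday date out) := by unfold Spec_is_holiday; infer_instance

-- ===== CLAIM (what is proved, stated in full; the proofs are below) =====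
def Claim_equal_is_holiday : Prop := ∀ (date : String), Dom_is_holiday date → Spec_is_holiday date (is_holiday date)

-- ===== LEMMAS AND PROOFS =====
-- the two easter-monday computations agree on the 23 Good-Friday constants
theorem pv_easter_lists_eq : pvGoodFridays.map gFri2eMon = pvGoodFridays.map pvEMon := by decide

-- ===== VERDICT (by name: the statement is the Claim_ definition above) =====
theorem is_holiday_spec : Claim_equal_is_holiday := by
  intro date _
  unfold Spec_is_holiday is_holiday is_holiday_alt
  rw [pv_easter_lists_eq]
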